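-- pv_equiv track=rewrite | github.com/Dlfmiee/CP125-Class-Repo | labs/lab05/exercise7/exercise7.py | find_conflicting_ports
-- ===== SOURCE A (Python) =====
-- def find_conflicting_ports(rules):
--     first_action = {}
--     conflicts = {}
--
--     for rule_id, port, action in rules:
--         if port not in first_action:
--             first_action[port] = action
--         else:
--             if action != first_action[port] and port not in conflicts:
--                 conflicts[port] = rule_id
--
--     return sorted([(p, rid) for p, rid in conflicts.items()], key=lambda x: x[0])
-- ===== SOURCE B (Python) =====
-- def find_conflicting_ports(rules):
--     # Phase 1: group rules by port, keeping (rule_id, action) in order.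
--     groups = {}
--     for rule_id, port, action in rules:
--         groups.setdefault(port, []).append((rule_id, action))
--     # Phase 2: per port, baseline = first action; first later entry that differs.
--     out = []
--     for port, entries in groups.items():
--         base = entries[0][1]
--         for rid, act in entries[1:]:
--             if act != base:
--                 out.append((port, rid))
--                 break
--     return sorted(out, key=lambda x: x[0])
-- ===== Notes on version B (the rewrite author's own statement) =====
-- stated objective: alternative
-- what changed: B replaces A's single pass maintaining two sentinel dicts (first action per port, first conflicting rule per port) by two phases: it first groups rules per port into ordered (rule_id, action) lists, then scans each group for the first entry whose action differs from the group's first action; output is sorted by port as in A.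
import Mathlib
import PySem

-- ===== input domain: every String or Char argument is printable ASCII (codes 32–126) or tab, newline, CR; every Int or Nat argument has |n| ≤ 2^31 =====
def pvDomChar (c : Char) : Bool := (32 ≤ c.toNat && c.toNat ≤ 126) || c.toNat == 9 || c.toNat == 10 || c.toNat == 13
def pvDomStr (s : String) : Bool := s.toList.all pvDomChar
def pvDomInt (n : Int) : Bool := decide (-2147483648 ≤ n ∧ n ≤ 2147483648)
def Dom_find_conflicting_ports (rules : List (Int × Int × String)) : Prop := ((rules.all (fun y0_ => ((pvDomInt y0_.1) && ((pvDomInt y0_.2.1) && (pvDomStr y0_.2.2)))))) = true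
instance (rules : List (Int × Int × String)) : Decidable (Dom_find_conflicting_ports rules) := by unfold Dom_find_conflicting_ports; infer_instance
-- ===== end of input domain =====

-- B groups rules per port first, then detects each port's first conflicting rule; same result as A's two-sentinel-dict single pass.

-- ===== PORT A =====
-- one pass over rules, state = (first_action, conflicts); then sorted(conflicts.items(), key=fst)
def find_conflicting_ports (rules : List (Int × Int × String)) : List (Int × Int) :=
  let st := rules.foldl
    (fun (st : PySem.Dict Int String × PySem.Dict Int Int) r =>
      let rule_id := r.1; let port := r.2.1; let action := r.2.2
      if st.1.contains port = false then
        (st.1.insert port action, st.2)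
      else if action ≠ st.1.getD port "" ∧ st.2.contains port = false then
        (st.1, st.2.insert port rule_id)
      else st)
    (PySem.Dict.empty, PySem.Dict.empty)
  PySem.List.sorted st.2.items (fun x => x.1) false

-- ===== PORT B =====
-- inner 'for rid, act in entries[1:]: if act != base: … break'
def pvDetectFrom (base : String) : List (Int × String) → Option Int
  | [] => none
  | e :: t => if e.2 ≠ base then some e.1 else pvDetectFrom base t

def find_conflicting_ports_alt (rules : List (Int × Int × String)) : List (Int × Int) :=
  -- Phase 1: groups.setdefault(port, []).append((rule_id, action))
  let groups : PySem.Dict Int (List (Int × String)) :=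
    rules.foldl (fun d r => d.modify r.2.1 [] (· ++ [(r.1, r.2.2)])) PySem.Dict.empty
  -- Phase 2: baseline = entries[0][1]; first later differing entry
  let out := groups.items.foldl
    (fun acc pe =>
      match pe.2 with
      | [] => acc
      | h :: t =>
        match pvDetectFrom h.2 t with
        | some rid => acc ++ [(pe.1, rid)]
        | none => acc)
    ([] : List (Int × Int))
  PySem.List.sorted out (fun x => x.1) false

-- ===== PRECONDITION & SPEC =====
def Spec_find_conflicting_ports (rules : List (Int × Int × String)) (out : List (Int × Int)) : Prop := out = find_conflicting_ports_alt rules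
instance (rules : List (Int × Int × String)) (out : List (Int × Int)) : Decidable (Spec_find_conflicting_ports rules out) := by unfold Spec_find_conflicting_ports; infer_instance

-- ===== CLAIM (what is proved, stated in full; the proofs are below) =====
def Claim_equal_find_conflicting_ports : Prop := ∀ (rules : List (Int × Int × String)), Dom_find_conflicting_ports rules → Spec_find_conflicting_ports rules (find_conflicting_ports rules)

-- ===== LEMMAS AND PROOFS =====

-- the (rule_id, action) entries of the rules whose port is p, in order
def pvGrp (p : Int) (rules : List (Int × Int × String)) : List (Int × String) :=
  (rules.filter (fun r => r.2.1 == p)).map (fun r => (r.1, r.2.2))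

-- first entry after the head whose action differs from the head's
def pvDetect : List (Int × String) → Option Int
  | [] => none
  | h :: t => pvDetectFrom h.2 t

-- A's loop, named for the proofs (same lambda as in the port)
def pvFoldA (rules : List (Int × Int × String)) : PySem.Dict Int String × PySem.Dict Int Int :=
  rules.foldl
    (fun (st : PySem.Dict Int String × PySem.Dict Int Int) r =>
      let rule_id := r.1; let port := r.2.1; let action := r.2.2
      if st.1.contains port = false then
        (st.1.insert port action, st.2)
      else if action ≠ st.1.getD port "" ∧ st.2.contains port = false then
        (st.1, st.2.insert port rule_id)
      else st)
    (PySem.Dict.empty, PySem.Dict.empty)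

theorem pvFoldA_find : ∀ rules, find_conflicting_ports rules
    = PySem.List.sorted (pvFoldA rules).2.items (fun x => x.1) false := fun _ => rfl

theorem pvDetectFrom_append (b : String) (t s : List (Int × String)) :
    pvDetectFrom b (t ++ s) =
      (match pvDetectFrom b t with
       | some r => some r
       | none => pvDetectFrom b s) := by
  induction t with
  | nil => simp [pvDetectFrom]
  | cons e t ih =>
    by_cases h : e.2 = b <;> simp [pvDetectFrom, h, ih]

theorem pvGrp_append (p : Int) (rs : List (Int × Int × String)) (x : Int × Int × String) :
    pvGrp p (rs ++ [x]) = pvGrp p rs ++ (if x.2.1 = p then [(x.1, x.2.2)] else []) := by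
  by_cases h : x.2.1 = p
  · simp [pvGrp, List.filter_append, List.map_append, List.filter, h]
  · have hb : (x.2.1 == p) = false := by simpa using h
    simp [pvGrp, List.filter_append, List.filter, h, hb]

-- the invariant of A's loop
theorem pvFoldA_spec (rules : List (Int × Int × String)) :
    (pvFoldA rules).1.keys.Nodup ∧ (pvFoldA rules).2.keys.Nodup ∧
    (∀ p, (pvFoldA rules).1.get? p = (pvGrp p rules).head?.map (fun e => e.2)) ∧
    (∀ p, (pvFoldA rules).2.get? p = pvDetect (pvGrp p rules)) := by
  induction rules using List.reverseRecOn with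
  | nil =>
    refine ⟨?_, ?_, ?_, ?_⟩ <;>
      simp [pvFoldA, pvGrp, pvDetect, PySem.Dict.get?_empty, PySem.Dict.keys_empty]
  | append_singleton rs x ih =>
    obtain ⟨nd1, nd2, h1, h2⟩ := ih
    obtain ⟨rid, p0, act⟩ := x
    have hfold : pvFoldA (rs ++ [(rid, p0, act)]) =
        (if (pvFoldA rs).1.contains p0 = false then
           ((pvFoldA rs).1.insert p0 act, (pvFoldA rs).2)
         else if act ≠ (pvFoldA rs).1.getD p0 "" ∧ (pvFoldA rs).2.contains p0 = false then
           ((pvFoldA rs).1, (pvFoldA rs).2.insert p0 rid)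
         else pvFoldA rs) := by
      simp [pvFoldA, List.foldl_append]
    by_cases hc : (pvFoldA rs).1.contains p0 = false
    · -- first occurrence of p0
      have hnone : (pvFoldA rs).1.get? p0 = none := by
        rw [PySem.Dict.contains_eq_isSome_get?] at hc
        cases hh : (pvFoldA rs).1.get? p0 <;> simp [hh] at hc ⊢
      have hgrp0 : pvGrp p0 rs = [] := by
        have := h1 p0; rw [hnone] at this
        cases hg : pvGrp p0 rs <;> simp [hg] at this ⊢
      rw [hfold, if_pos hc]
      refine ⟨PySem.Dict.nodup_keys_insert _ _ _ nd1, nd2, ?_, ?_⟩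
      · intro p
        by_cases hp : p = p0
        · subst hp
          simp [pvGrp_append, hgrp0]
        · have hx : ¬ ((rid, p0, act).2.1 = p) := by simpa using fun h => hp h.symm
          simp [PySem.Dict.get?_insert, pvGrp_append, hp, hx, h1 p]
      · intro p
        by_cases hp : p = p0
        · subst hp
          simp [pvGrp_append, hgrp0, h2 p, pvDetect, pvDetectFrom]
        · have hx : ¬ ((rid, p0, act).2.1 = p) := by simpa using fun h => hp h.symm
          simp [pvGrp_append, hx, h2 p]
    · -- p0 already seen: pvGrp p0 rs = hd :: tl
      have hsome : ∃ v, (pvFoldA rs).1.get? p0 = some v := by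
        rw [PySem.Dict.contains_eq_isSome_get?] at hc
        cases hh : (pvFoldA rs).1.get? p0 <;> simp [hh] at hc ⊢
      obtain ⟨hd, tl, hgrp0⟩ : ∃ hd tl, pvGrp p0 rs = hd :: tl := by
        obtain ⟨v, hv⟩ := hsome
        have := h1 p0; rw [hv] at this
        cases hg : pvGrp p0 rs with
        | nil => rw [hg] at this; simp at this
        | cons a b => exact ⟨a, b, rfl⟩
      have hget1 : (pvFoldA rs).1.get? p0 = some hd.2 := by
        have := h1 p0; rw [hgrp0] at this; simpa using this
      have hgetD : (pvFoldA rs).1.getD p0 "" = hd.2 := by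
        rw [PySem.Dict.getD_eq_get?_getD, hget1]; rfl
      rw [hfold, if_neg hc]
      by_cases hcond : act ≠ (pvFoldA rs).1.getD p0 "" ∧ (pvFoldA rs).2.contains p0 = false
      · -- record the conflict
        have hne : act ≠ hd.2 := by rw [hgetD] at hcond; exact hcond.1
        have hdet : pvDetectFrom hd.2 tl = none := by
          have hn : (pvFoldA rs).2.get? p0 = none := by
            have hcf := hcond.2; rw [PySem.Dict.contains_eq_isSome_get?] at hcf
            cases hh : (pvFoldA rs).2.get? p0 <;> simp [hh] at hcf ⊢
          have := h2 p0; rw [hn, hgrp0] at this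
          simpa [pvDetect] using this.symm
        rw [if_pos hcond]
        refine ⟨nd1, PySem.Dict.nodup_keys_insert _ _ _ nd2, ?_, ?_⟩
        · intro p
          by_cases hp : p = p0
          · subst hp
            simp [pvGrp_append, hgrp0, h1 p]
          · have hx : ¬ ((rid, p0, act).2.1 = p) := by simpa using fun h => hp h.symm
            simp [pvGrp_append, hx, h1 p]
        · intro p
          by_cases hp : p = p0
          · subst hp
            simp [pvGrp_append, hgrp0, pvDetect, pvDetectFrom_append, hdet, pvDetectFrom, hne]
          · have hx : ¬ ((rid, p0, act).2.1 = p) := by simpa using fun h => hp h.symm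
            simp [PySem.Dict.get?_insert, pvGrp_append, hp, hx, h2 p]
      · -- nothing changes
        rw [if_neg hcond]
        refine ⟨nd1, nd2, ?_, ?_⟩
        · intro p
          by_cases hp : p = p0
          · subst hp
            simp [pvGrp_append, hgrp0, h1 p]
          · have hx : ¬ ((rid, p0, act).2.1 = p) := by simpa using fun h => hp h.symm
            simp [pvGrp_append, hx, h1 p]
        · intro p
          by_cases hp : p = p0
          · subst hp
            have hcase : act = hd.2 ∨ ∃ r, pvDetectFrom hd.2 tl = some r := by
              rcases Decidable.not_and_iff_not_or_not.mp hcond with h | h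
              · left; rw [hgetD] at h; exact not_not.mp h
              · right
                have hct : (pvFoldA rs).2.contains p = true := by
                  cases hcc : (pvFoldA rs).2.contains p <;> simp [hcc] at h ⊢
                rw [PySem.Dict.contains_eq_isSome_get?] at hct
                have h2' := h2 p; rw [hgrp0] at h2'
                cases hh : (pvFoldA rs).2.get? p with
                | none => rw [hh] at hct; simp at hct
                | some r => rw [hh] at h2'; exact ⟨r, by simpa [pvDetect] using h2'.symm⟩
            rw [h2 p, hgrp0, pvGrp_append]
            simp only [hgrp0, pvDetect, List.cons_append, pvDetectFrom_append]
            rcases hcase with he | ⟨r, hr⟩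
            · cases hdt : pvDetectFrom hd.2 tl <;> simp [pvDetectFrom, he]
            · simp [hr]
          · have hx : ¬ ((rid, p0, act).2.1 = p) := by simpa using fun h => hp h.symm
            simp [pvGrp_append, hx, h2 p]

-- ---- B side ----

def pvGroupsB (rules : List (Int × Int × String)) : PySem.Dict Int (List (Int × String)) :=
  rules.foldl (fun d r => d.modify r.2.1 [] (· ++ [(r.1, r.2.2)])) PySem.Dict.empty

theorem pvGroupsB_keys (rules : List (Int × Int × String)) :
    (pvGroupsB rules).keys = PySem.Set.ofList (rules.map (fun r => r.2.1)) := by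
  unfold pvGroupsB
  rw [PySem.Dict.keys_foldl_modify_key rules (fun r => r.2.1) []
    (fun _ r => fun v => v ++ [(r.1, r.2.2)]) PySem.Dict.empty]
  simp [PySem.Dict.keys_empty, PySem.Set.ofList, PySem.Set.update]

theorem pvGroupsB_nodup (rules : List (Int × Int × String)) :
    (pvGroupsB rules).keys.Nodup := by
  unfold pvGroupsB
  exact PySem.Dict.nodup_keys_foldl_modify_key rules (fun r => r.2.1) []
    (fun _ r => fun v => v ++ [(r.1, r.2.2)]) PySem.Dict.empty PySem.Dict.nodup_keys_empty

theorem pvGroupsB_getD (rules : List (Int × Int × String)) (p : Int) :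
    (pvGroupsB rules).getD p [] = pvGrp p rules := by
  unfold pvGroupsB
  rw [show rules.foldl (fun d r => d.modify r.2.1 [] (· ++ [(r.1, r.2.2)])) PySem.Dict.empty
      = (rules.map (fun r => (r.2.1, (r.1, r.2.2)))).foldl
          (fun d q => d.modify q.1 [] (· ++ [q.2])) PySem.Dict.empty from
    (List.foldl_map (f := fun r : Int × Int × String => (r.2.1, (r.1, r.2.2)))
      (g := fun (d : PySem.Dict Int (List (Int × String))) q =>
        d.modify q.1 [] (· ++ [q.2]))).symm]
  rw [PySem.Dict.getD_foldl_modify_append]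
  simp only [pvGrp, List.filter_map, List.map_map, PySem.Dict.getD_eq_get?_getD,
    PySem.Dict.get?_empty]
  rfl

-- the option-valued collect loop, as a filter+map over the key list
theorem pvFlatMapOpt (F : Int → Option Int) (ks : List Int) :
    (ks.flatMap (fun k => match F k with | some rid => [(k, rid)] | none => []))
      = (ks.filter (fun k => (F k).isSome)).map (fun k => (k, (F k).getD 0)) := by
  induction ks with
  | nil => rfl
  | cons k t ih => cases h : F k <;> simp [List.filter, h, ih]

theorem pvMemFlatMapOpt (F : Int → Option Int) (ks : List Int) (p rid : Int) :
    (p, rid) ∈ ks.flatMap (fun k => match F k with | some rid => [(k, rid)] | none => [])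
      ↔ p ∈ ks ∧ F p = some rid := by
  rw [List.mem_flatMap]
  constructor
  · rintro ⟨k, hk, hm⟩
    cases h : F k with
    | none => rw [h] at hm; simp at hm
    | some r =>
      rw [h] at hm; simp at hm
      exact ⟨hm.1 ▸ hk, by rw [hm.1, h, hm.2]⟩
  · rintro ⟨hk, hF⟩
    exact ⟨p, hk, by rw [hF]; simp⟩

theorem pvAlt_out (rules : List (Int × Int × String)) :
    find_conflicting_ports_alt rules
      = PySem.List.sorted
          ((pvGroupsB rules).keys.flatMap
            (fun k => match pvDetect (pvGrp k rules) with
                      | some rid => [(k, rid)] | none => []))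
          (fun x => x.1) false := by
  unfold find_conflicting_ports_alt
  have hbody : ∀ (acc : List (Int × Int)) (pe : Int × List (Int × String)),
      (match pe.2 with
       | [] => acc
       | h :: t =>
         match pvDetectFrom h.2 t with
         | some rid => acc ++ [(pe.1, rid)]
         | none => acc)
      = acc ++ (match pvDetect pe.2 with
                | some rid => [(pe.1, rid)] | none => []) := by
    intro acc pe
    cases pe.2 with
    | nil => simp [pvDetect]
    | cons h t => cases hd : pvDetectFrom h.2 t <;> simp [pvDetect, hd]
  simp only [hbody]
  rw [PySem.List.foldl_append_eq_flatMap
    (fun pe : Int × List (Int × String) =>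
      match pvDetect pe.2 with | some rid => [(pe.1, rid)] | none => [])]
  rw [show List.foldl (fun (d : PySem.Dict Int (List (Int × String))) (r : Int × Int × String) =>
        d.modify r.2.1 [] fun x => x ++ [(r.1, r.2.2)]) PySem.Dict.empty rules
      = pvGroupsB rules from rfl]
  have hitems : (pvGroupsB rules).items
      = (pvGroupsB rules).keys.map (fun k => (k, pvGrp k rules)) := by
    rw [PySem.Dict.items_eq_map_keys (pvGroupsB rules) (pvGroupsB_nodup rules) []]
    exact List.map_congr_left (fun k _ => by rw [pvGroupsB_getD])
  rw [hitems, List.flatMap_map]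
  simp

theorem pvPairwiseLt (l : List (Int × Int))
    (h1 : l.Pairwise (fun a b => a.1 ≤ b.1)) (h2 : (l.map Prod.fst).Nodup) :
    l.Pairwise (fun a b => a.1 < b.1) := by
  rw [List.Nodup, List.pairwise_map] at h2
  exact (h1.and h2).imp (fun h => lt_of_le_of_ne h.1 h.2)

-- ===== VERDICT (by name: the statement is the Claim_ definition above) =====
theorem find_conflicting_ports_spec : Claim_equal_find_conflicting_ports := by
  intro rules _
  unfold Spec_find_conflicting_ports
  obtain ⟨_, nd2, _, h2⟩ := pvFoldA_spec rules
  set F : Int → Option Int := fun p => pvDetect (pvGrp p rules) with hF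
  set LA : List (Int × Int) := (pvFoldA rules).2.items with hLA
  set ks : List Int := (pvGroupsB rules).keys with hks
  set LB : List (Int × Int) :=
    ks.flatMap (fun k => match F k with | some rid => [(k, rid)] | none => []) with hLB
  have ndks : ks.Nodup := pvGroupsB_nodup rules
  -- membership agreement
  have hmemA : ∀ p rid, (p, rid) ∈ LA ↔ F p = some rid := by
    intro p rid
    rw [hLA, ← PySem.Dict.get?_eq_some_iff_mem_items _ _ _ nd2, h2 p]
  have hFks : ∀ p rid, F p = some rid → p ∈ ks := by
    intro p rid h
    rw [hks, pvGroupsB_keys, PySem.Set.mem_ofList]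
    rcases hg : pvGrp p rules with _ | ⟨hd, tl⟩
    · rw [hF] at h; simp only at h; rw [hg] at h; simp [pvDetect] at h
    · have : ∃ r ∈ rules, r.2.1 == p := by
        have : (rules.filter (fun r => r.2.1 == p)) ≠ [] := by
          intro hnil; simp [pvGrp, hnil] at hg
        rcases List.exists_mem_of_ne_nil _ this with ⟨r, hr⟩
        exact ⟨r, (List.mem_filter.mp hr).1, (List.mem_filter.mp hr).2⟩
      rcases this with ⟨r, hr, hrp⟩
      exact List.mem_map.mpr ⟨r, hr, by simpa using hrp⟩
  have hmem : ∀ x, x ∈ LA ↔ x ∈ LB := by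
    rintro ⟨p, rid⟩
    rw [hmemA, hLB, pvMemFlatMapOpt]
    exact ⟨fun h => ⟨hFks p rid h, h⟩, fun h => h.2⟩
  -- Nodup on both sides
  have ndLA : LA.Nodup := by
    apply List.Nodup.of_map Prod.fst
    exact nd2
  have ndLBfst : (LB.map Prod.fst).Nodup := by
    rw [hLB, pvFlatMapOpt, List.map_map]
    have : (Prod.fst ∘ fun k => (k, (F k).getD 0)) = id := rfl
    rw [this, List.map_id]
    exact ndks.filter _
  have ndLB : LB.Nodup := List.Nodup.of_map Prod.fst ndLBfst
  have hperm : LA.Perm LB := (List.perm_ext_iff_of_nodup ndLA ndLB).mpr hmem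
  -- both results are the same sorted list
  rw [pvFoldA_find, pvAlt_out, ← hLA, ← hLB]
  apply PySem.List.sorted_eq_of_perm_of_pairwise_lt
  · exact ((PySem.List.sorted_perm LB (fun x => x.1) false).trans hperm.symm)
  · apply pvPairwiseLt
    · exact PySem.List.sorted_pairwise LB (fun x => x.1)
    · have : ((PySem.List.sorted LB (fun x => x.1) false).map Prod.fst).Perm (LB.map Prod.fst) :=
        (PySem.List.sorted_perm LB (fun x => x.1) false).map Prod.fst
      exact this.nodup_iff.mpr ndLBfst
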